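-- pv_equiv track=rewrite | github.com/har-ee/AdventOfCode2025 | day06/day6b.py | split_sums
-- ===== SOURCE A (Python) =====
-- def split_sums(rows):
--     split_rows = [[]]
--     for row in rows:
--         if [r for r in row if r != ' ']:
--             split_rows[-1].append(row)
--         else:
--             split_rows.append([])
--     return split_rows
-- ===== SOURCE B (Python) =====
-- def split_sums(rows):
--     rows = list(rows)
--     seps = [i for i, row in enumerate(rows) if all(c == ' ' for c in row)]
--     starts = [0] + [i + 1 for i in seps]
--     ends = seps + [len(rows)]
--     return [rows[a:b] for a, b in zip(starts, ends)]
-- ===== Notes on version B (the rewrite author's own statement) =====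
-- stated objective: alternative
-- what changed: Replaces A's single-pass loop that mutates the last group with a two-pass scheme: first collect the indices of blank rows via enumerate, then build start/end boundaries and slice the row list between consecutive boundaries.
import Mathlib
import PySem

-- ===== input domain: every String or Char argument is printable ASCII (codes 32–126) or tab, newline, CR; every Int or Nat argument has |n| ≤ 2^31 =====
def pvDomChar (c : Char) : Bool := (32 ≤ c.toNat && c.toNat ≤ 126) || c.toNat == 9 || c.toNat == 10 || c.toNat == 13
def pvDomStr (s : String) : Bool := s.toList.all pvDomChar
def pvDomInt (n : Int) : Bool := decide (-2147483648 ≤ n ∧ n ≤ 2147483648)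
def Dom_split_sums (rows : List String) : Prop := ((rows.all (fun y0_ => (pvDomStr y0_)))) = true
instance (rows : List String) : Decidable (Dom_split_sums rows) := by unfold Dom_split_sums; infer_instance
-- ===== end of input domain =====

-- B replaces A's single-pass append-to-last-group loop by two passes — collect blank-row
-- indices, then slice between consecutive boundaries (objective: alternative decomposition).


-- ===== PORT A =====
-- split_rows[-1].append(row): append row to the last group (acc is never empty in A)
def pyAppendLast (xss : List (List String)) (row : String) : List (List String) :=
  match xss with
  | [] => []
  | [g] => [g ++ [row]]
  | g :: rest => g :: pyAppendLast rest row

def stepA (acc : List (List String)) (row : String) : List (List String) :=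
  if row.toList.filter (fun c => c != ' ') ≠ [] then pyAppendLast acc row
  else acc ++ [[]]

def split_sums (rows : List String) : List (List String) :=
  rows.foldl stepA [[]]

-- ===== PORT B =====
def split_sums_alt (rows : List String) : List (List String) :=
  let seps : List Int :=
    ((PySem.List.enumerate rows 0).filter (fun p => p.2.toList.all (fun c => c == ' '))).map (·.1)
  let starts : List Int := 0 :: seps.map (· + 1)
  let ends : List Int := seps ++ [(rows.length : Int)]
  List.zipWith (fun a b => PySem.List.slice rows (some a) (some b)) starts ends

-- ===== PRECONDITION & SPEC =====
def Spec_split_sums (rows : List String) (out : List (List String)) : Prop := out = split_sums_alt rows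
instance (rows : List String) (out : List (List String)) : Decidable (Spec_split_sums rows out) := by unfold Spec_split_sums; infer_instance

-- ===== CLAIM (what is proved, stated in full; the proofs are below) =====
def Claim_equal_split_sums : Prop := ∀ (rows : List String), Dom_split_sums rows → Spec_split_sums rows (split_sums rows)

-- ===== LEMMAS AND PROOFS =====

-- common recursive characterisation of the grouping
def consHead (r : String) : List (List String) → List (List String)
  | [] => []
  | g :: gs => (r :: g) :: gs

def fSpec : List String → List (List String)
  | [] => [[]]
  | r :: rs => if r.toList.all (fun c => c == ' ') then [] :: fSpec rs else consHead r (fSpec rs)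

lemma fSpec_ne_nil (rows : List String) : fSpec rows ≠ [] := by
  cases rows with
  | nil => simp [fSpec]
  | cons r rs =>
      simp only [fSpec]
      split
      · simp
      · cases h : fSpec rs with
        | nil => exact absurd h (fSpec_ne_nil rs)
        | cons g gs => simp [consHead]

-- ----- A-side -----
def capHead (g : List String) : List (List String) → List (List String)
  | [] => []
  | h :: t => (g ++ h) :: t

lemma pyAppendLast_spec (init : List (List String)) (g : List String) (row : String) :
    pyAppendLast (init ++ [g]) row = init ++ [g ++ [row]] := by
  induction init with
  | nil => rfl
  | cons x it ih =>
      cases it with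
      | nil => rfl
      | cons y it' => simpa [pyAppendLast] using ih

lemma blank_test (row : String) :
    (row.toList.filter (fun c => c != ' ') ≠ []) ↔ ¬ (row.toList.all (fun c => c == ' ') = true) := by
  simp [List.filter_eq_nil_iff, List.all_eq_true]

lemma foldl_A (rows : List String) : ∀ (init : List (List String)) (g : List String),
    List.foldl stepA (init ++ [g]) rows = init ++ capHead g (fSpec rows) := by
  induction rows with
  | nil => intro init g; simp [fSpec, capHead]
  | cons r rs ih =>
      intro init g
      by_cases hb : (r.toList.all (fun c => c == ' ') = true)
      · have hf : ¬ (List.filter (fun c => c != ' ') r.toList ≠ []) := by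
          rw [blank_test]; simpa using hb
        have step : List.foldl stepA (init ++ [g]) (r :: rs)
            = List.foldl stepA ((init ++ [g]) ++ [[]]) rs := by
          simp only [List.foldl_cons, stepA, if_neg hf]
        rw [step, ih (init ++ [g]) []]
        cases hfs : fSpec rs with
        | nil => exact absurd hfs (fSpec_ne_nil rs)
        | cons h t => simp [fSpec, hb, capHead, hfs]
      · have hf : (List.filter (fun c => c != ' ') r.toList ≠ []) := (blank_test r).mpr hb
        have step : List.foldl stepA (init ++ [g]) (r :: rs)
            = List.foldl stepA (init ++ [g ++ [r]]) rs := by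
          simp only [List.foldl_cons, stepA, if_pos hf, pyAppendLast_spec]
        rw [step, ih init (g ++ [r])]
        cases hfs : fSpec rs with
        | nil => exact absurd hfs (fSpec_ne_nil rs)
        | cons h t => simp [fSpec, hb, capHead, consHead, hfs]

lemma A_eq_fSpec (rows : List String) : split_sums rows = fSpec rows := by
  have h := foldl_A rows [] []
  cases hf : fSpec rows with
  | nil => exact absurd hf (fSpec_ne_nil rows)
  | cons g gs => simpa [split_sums, hf, capHead] using h

-- ----- B-side -----
def natSeps : List String → List Nat
  | [] => []
  | r :: rs => if r.toList.all (fun c => c == ' ') then 0 :: (natSeps rs).map (· + 1)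
               else (natSeps rs).map (· + 1)

lemma seps_eq (rows : List String) : ∀ (s : Int),
    ((PySem.List.enumerate rows s).filter (fun p => p.2.toList.all (fun c => c == ' '))).map (·.1)
      = (natSeps rows).map (fun k : Nat => s + (k : Int)) := by
  induction rows with
  | nil => intro s; simp [PySem.List.enumerate_nil, natSeps]
  | cons r rs ih =>
      intro s
      simp only [PySem.List.enumerate_cons, natSeps, List.filter_cons]
      by_cases hb : (r.toList.all (fun c => c == ' ') = true)
      · simp [hb, ih (s + 1)]
        intro a _
        omega
      · simp [hb, ih (s + 1)]
        intro a _
        omega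

def natAlt (rows : List String) : List (List String) :=
  List.zipWith (fun a b : Nat => (rows.drop a).take (b - a))
    (0 :: (natSeps rows).map (· + 1)) (natSeps rows ++ [rows.length])

lemma alt_eq_natAlt (rows : List String) : split_sums_alt rows = natAlt rows := by
  unfold split_sums_alt natAlt
  rw [seps_eq rows 0]
  simp only [zero_add]
  have h1 : (0 : Int) :: (((natSeps rows).map (fun k : Nat => (k : Int))).map (· + 1))
      = ((0 :: (natSeps rows).map (· + 1)).map (fun k : Nat => (k : Int))) := by
    simp [List.map_map, Function.comp_def]
  have h2 : (((natSeps rows).map (fun k : Nat => (k : Int))) ++ [((rows.length : Nat) : Int)])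
      = ((natSeps rows ++ [rows.length]).map (fun k : Nat => (k : Int))) := by
    simp
  rw [h1, h2, List.zipWith_map]
  simp only [PySem.List.slice_natCast]

lemma zip_shift (rs : List String) (r : String) (u v : List Nat) :
    List.zipWith (fun a b : Nat => ((r :: rs).drop a).take (b - a)) (u.map (· + 1)) (v.map (· + 1))
      = List.zipWith (fun a b : Nat => (rs.drop a).take (b - a)) u v := by
  rw [List.zipWith_map]
  simp [Nat.succ_sub_succ]

lemma map_add_one_append (S : List Nat) (n : Nat) :
    (S.map (· + 1)) ++ [n + 1] = (S ++ [n]).map (· + 1) := by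
  simp

lemma natAlt_eq_fSpec (rows : List String) : natAlt rows = fSpec rows := by
  induction rows with
  | nil => simp [natAlt, natSeps, fSpec]
  | cons r rs ih =>
      by_cases hb : (r.toList.all (fun c => c == ' ') = true)
      · have key : natAlt (r :: rs) = [] :: natAlt rs := by
          unfold natAlt
          simp only [natSeps, hb, if_true, List.length_cons]
          rw [show ((0 : Nat) :: (natSeps rs).map (· + 1)) ++ [rs.length + 1]
                = (0 : Nat) :: ((natSeps rs).map (· + 1) ++ [rs.length + 1]) from rfl]
          rw [List.zipWith_cons_cons, map_add_one_append, zip_shift]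
          simp
        rw [key, ih]
        simp [fSpec, hb]
      · have key : natAlt (r :: rs) = consHead r (natAlt rs) := by
          unfold natAlt
          have hNS : natSeps (r :: rs) = (natSeps rs).map (· + 1) := by
            simp [natSeps, hb]
          rw [hNS]
          simp only [List.length_cons]
          cases hS : natSeps rs with
          | nil =>
              simp [consHead, List.take_succ_cons]
          | cons s0 S' =>
              rw [show ((s0 :: S').map (· + 1)) = (s0 + 1) :: S'.map (· + 1) from rfl]
              rw [show ((s0 + 1) :: S'.map (· + 1)) ++ [rs.length + 1]
                    = (s0 + 1) :: (S'.map (· + 1) ++ [rs.length + 1]) from rfl]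
              rw [List.zipWith_cons_cons, map_add_one_append, zip_shift]
              simp [consHead, List.take_succ_cons]
        rw [key, ih]
        simp [fSpec, hb]

-- ===== VERDICT (by name: the statement is the Claim_ definition above) =====
theorem split_sums_spec : Claim_equal_split_sums := by
  intro rows _
  unfold Spec_split_sums
  rw [alt_eq_natAlt, natAlt_eq_fSpec, A_eq_fSpec]
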